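-- pv_equiv track=rewrite | github.com/DiegoAbdiasSaldanaFuentes/Proyectos-Universidad | Primer_año/PYTHON/Listas y Tuplas/a.py | proceso
-- ===== SOURCE A (Python) =====
-- def izq_der (tablero,palabra):
--     for linea in tablero:
--         if palabra in linea:
--             return 'SI'
--     return 'NO'
--
-- def der_izq(tablero,palabra):
--     for linea in tablero:
--         cadena = ''
--         for letra in linea:
--             cadena = letra + cadena
--         if palabra in cadena:
--             return 'SI'
--     return 'NO'
--
-- def proceso (tablero, palabras):
--     solucion = []
--     for palabra in palabras:
--         esta1 = izq_der(tablero, palabra)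
--         esta2 = der_izq(tablero, palabra)
--         if esta1 == 'SI' or esta2 == 'SI':
--             solucion.append([palabra +'- Si'])
--         else:
--             solucion.append([palabra + '- No'])
--     return solucion
-- ===== SOURCE B (Python) =====
-- def proceso(tablero, palabras):
--     subs = set()
--     for linea in tablero:
--         n = len(linea)
--         for i in range(n + 1):
--             for j in range(i, n + 1):
--                 subs.add(linea[i:j])
--     return [[palabra + '- Si'] if (palabra in subs or palabra[::-1] in subs) else [palabra + '- No']
--             for palabra in palabras]
-- ===== Notes on version B (the rewrite author's own statement) =====
-- stated objective: faster
-- what changed: Instead of scanning every row (and re-building each row reversed) once per word, B precomputes one hash set of all substrings of all rows and answers each word with two O(1) set lookups (word and its reversal).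
import Mathlib
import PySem

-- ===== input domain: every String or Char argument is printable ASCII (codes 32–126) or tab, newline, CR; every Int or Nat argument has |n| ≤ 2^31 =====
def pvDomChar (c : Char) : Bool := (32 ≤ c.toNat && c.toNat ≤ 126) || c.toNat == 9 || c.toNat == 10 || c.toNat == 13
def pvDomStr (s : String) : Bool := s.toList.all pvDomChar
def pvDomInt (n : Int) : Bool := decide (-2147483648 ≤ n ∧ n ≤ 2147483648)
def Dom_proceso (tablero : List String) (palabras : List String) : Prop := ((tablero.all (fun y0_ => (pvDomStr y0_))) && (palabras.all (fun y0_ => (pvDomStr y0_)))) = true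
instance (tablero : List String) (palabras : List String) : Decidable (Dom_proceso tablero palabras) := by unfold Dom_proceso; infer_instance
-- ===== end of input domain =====

-- B replaces A's per-word scan over all rows (forward, and re-reversing every row for every word)
-- by one precomputed set of all row substrings, looked up once per word (objective: faster, asymptotic).

-- ===== PORT A =====
def izq_der (tablero : List String) (palabra : String) : String :=
  match tablero with
  | [] => "NO"
  | linea :: rest =>
    if PySem.Str.isIn palabra linea then "SI" else izq_der rest palabra

def der_izq (tablero : List String) (palabra : String) : String :=
  match tablero with
  | [] => "NO"
  | linea :: rest =>
    -- cadena = '' ; for letra in linea: cadena = letra + cadena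
    let cadena := linea.toList.foldl (fun cadena letra => [letra] ++ cadena) []
    if PySem.Chars.isIn palabra.toList cadena then "SI" else der_izq rest palabra

def proceso (tablero : List String) (palabras : List String) : List (List String) :=
  palabras.foldl (fun solucion palabra =>
    if izq_der tablero palabra = "SI" ∨ der_izq tablero palabra = "SI" then
      solucion ++ [[palabra ++ "- Si"]]
    else
      solucion ++ [[palabra ++ "- No"]]) []

-- ===== PORT B =====
-- the set 'subs' Source B builds: every substring linea[i:j] of every row
def allSubs (tablero : List String) : PySem.Set (List Char) :=
  tablero.foldl (fun subs linea =>
    (PySem.List.pyRange 0 ((linea.toList.length : Int) + 1) 1).foldl (fun subs i =>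
      (PySem.List.pyRange i ((linea.toList.length : Int) + 1) 1).foldl (fun subs j =>
        PySem.Set.add subs (PySem.List.slice linea.toList (some i) (some j))) subs) subs)
    PySem.Set.empty

def proceso_alt (tablero : List String) (palabras : List String) : List (List String) :=
  let subs := allSubs tablero
  palabras.map (fun palabra =>
    -- palabra[::-1] is the reversal (PySem.List.slice?_none_none_neg_one)
    if PySem.Set.contains subs palabra.toList || PySem.Set.contains subs palabra.toList.reverse then
      [palabra ++ "- Si"]
    else
      [palabra ++ "- No"])

-- ===== PRECONDITION & SPEC =====
def Spec_proceso (tablero : List String) (palabras : List String) (out : List (List String)) : Prop := out = proceso_alt tablero palabras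
instance (tablero : List String) (palabras : List String) (out : List (List String)) : Decidable (Spec_proceso tablero palabras out) := by unfold Spec_proceso; infer_instance

-- ===== CLAIM (what is proved, stated in full; the proofs are below) =====
def Claim_equal_proceso : Prop := ∀ (tablero : List String) (palabras : List String), Dom_proceso tablero palabras → Spec_proceso tablero palabras (proceso tablero palabras)

-- ===== LEMMAS AND PROOFS =====

-- a fold whose step adds elements characterised by P accumulates exactly P over the list
theorem mem_foldl_of_step {α β : Type} [BEq α] (g : PySem.Set α → β → PySem.Set α)
    (P : β → α → Prop) (hg : ∀ s b y, y ∈ g s b ↔ y ∈ s ∨ P b y) :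
    ∀ (xs : List β) (s : PySem.Set α) (y : α),
      y ∈ xs.foldl g s ↔ y ∈ s ∨ ∃ b ∈ xs, P b y := by
  intro xs
  induction xs with
  | nil => simp
  | cons b xs ih =>
    intro s y
    simp only [List.foldl_cons, ih, hg, List.mem_cons]
    constructor
    · rintro ((h | h) | ⟨c, hc, hPc⟩)
      · exact Or.inl h
      · exact Or.inr ⟨b, Or.inl rfl, h⟩
      · exact Or.inr ⟨c, Or.inr hc, hPc⟩
    · rintro (h | ⟨c, (rfl | hc), hPc⟩)
      · exact Or.inl (Or.inl h)
      · exact Or.inl (Or.inr hPc)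
      · exact Or.inr ⟨c, hc, hPc⟩

theorem slice_mem_infix (l : List Char) (i j : Int) (h0 : 0 ≤ i) (h1 : 0 ≤ j) :
    PySem.List.slice l (some i) (some j) <:+: l := by
  rw [PySem.List.slice_toNat l h0 h1]
  exact ((List.take_prefix _ _).isInfix).trans (List.drop_suffix _ l).isInfix

theorem infix_iff_slice (y l : List Char) :
    (∃ i ∈ PySem.List.pyRange 0 ((l.length : Int) + 1) 1,
       ∃ j ∈ PySem.List.pyRange i ((l.length : Int) + 1) 1,
         PySem.List.slice l (some i) (some j) = y) ↔ y <:+: l := by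
  constructor
  · rintro ⟨i, hi, j, hj, rfl⟩
    rw [PySem.List.mem_pyRange_one] at hi hj
    exact slice_mem_infix l i j hi.1 (le_trans hi.1 hj.1)
  · intro h
    obtain ⟨s, t, rfl⟩ := h
    refine ⟨(s.length : Int), ?_, (s.length : Int) + (y.length : Int), ?_, ?_⟩
    · rw [PySem.List.mem_pyRange_one]
      constructor
      · positivity
      · have : s.length ≤ (s ++ y ++ t).length := by simp
        omega
    · rw [PySem.List.mem_pyRange_one]
      constructor
      · omega
      · have : s.length + y.length ≤ (s ++ y ++ t).length := by simp
        omega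
    · rw [PySem.List.slice_natCast_add]
      simp

theorem mem_allSubs (tablero : List String) (y : List Char) :
    y ∈ allSubs tablero ↔ ∃ linea ∈ tablero, y <:+: linea.toList := by
  unfold allSubs
  rw [mem_foldl_of_step _ (fun linea y => y <:+: linea.toList)
      (fun s linea y =>
        (mem_foldl_of_step _
          (fun i y => ∃ j ∈ PySem.List.pyRange i ((linea.toList.length : Int) + 1) 1,
            PySem.List.slice linea.toList (some i) (some j) = y)
          (fun s i y =>
            mem_foldl_of_step _
              (fun j y => PySem.List.slice linea.toList (some i) (some j) = y)
              (fun s j y => (PySem.Set.mem_add s _ y).trans (or_congr Iff.rfl eq_comm)) _ s y)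
          _ s y).trans (or_congr Iff.rfl (infix_iff_slice y linea.toList)))]
  simp [PySem.Set.empty]

theorem contains_allSubs (tablero : List String) (y : List Char) :
    PySem.Set.contains (allSubs tablero) y = true ↔ ∃ linea ∈ tablero, y <:+: linea.toList := by
  rw [← mem_allSubs]
  simp [PySem.Set.contains]

theorem izq_der_eq_SI (tablero : List String) (palabra : String) :
    izq_der tablero palabra = "SI" ↔ ∃ linea ∈ tablero, palabra.toList <:+: linea.toList := by
  induction tablero with
  | nil => simp [izq_der]
  | cons linea rest ih =>
    simp only [izq_der, List.mem_cons]
    by_cases hb : PySem.Str.isIn palabra linea = true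
    · have h := (PySem.Str.isIn_iff_infix _ _).mp hb
      rw [if_pos hb]
      exact ⟨fun _ => ⟨linea, Or.inl rfl, h⟩, fun _ => rfl⟩
    · have h' : ¬ palabra.toList <:+: linea.toList :=
        fun hinf => hb ((PySem.Str.isIn_iff_infix _ _).mpr hinf)
      rw [if_neg hb, ih]
      constructor
      · rintro ⟨l, hl, hinf⟩; exact ⟨l, Or.inr hl, hinf⟩
      · rintro ⟨l, (rfl | hl), hinf⟩
        · exact absurd hinf h'
        · exact ⟨l, hl, hinf⟩

theorem der_izq_eq_SI (tablero : List String) (palabra : String) :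
    der_izq tablero palabra = "SI" ↔ ∃ linea ∈ tablero, palabra.toList <:+: linea.toList.reverse := by
  induction tablero with
  | nil => simp [der_izq]
  | cons linea rest ih =>
    have hrev : linea.toList.foldl (fun cadena letra => [letra] ++ cadena) [] = linea.toList.reverse := by
      simp only [List.singleton_append]
      rw [List.foldl_flip_cons_eq_append']
      simp
    simp only [der_izq, hrev, List.mem_cons]
    by_cases hb : PySem.Chars.isIn palabra.toList linea.toList.reverse = true
    · have h := (PySem.Chars.isIn_iff_infix _ _).mp hb
      rw [if_pos hb]
      exact ⟨fun _ => ⟨linea, Or.inl rfl, h⟩, fun _ => rfl⟩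
    · have h' : ¬ palabra.toList <:+: linea.toList.reverse :=
        fun hinf => hb ((PySem.Chars.isIn_iff_infix _ _).mpr hinf)
      rw [if_neg hb, ih]
      constructor
      · rintro ⟨l, hl, hinf⟩; exact ⟨l, Or.inr hl, hinf⟩
      · rintro ⟨l, (rfl | hl), hinf⟩
        · exact absurd hinf h'
        · exact ⟨l, hl, hinf⟩

theorem cond_equiv (tablero : List String) (palabra : String) :
    (izq_der tablero palabra = "SI" ∨ der_izq tablero palabra = "SI") ↔
      (PySem.Set.contains (allSubs tablero) palabra.toList ||
        PySem.Set.contains (allSubs tablero) palabra.toList.reverse) = true := by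
  rw [Bool.or_eq_true, contains_allSubs, contains_allSubs, izq_der_eq_SI, der_izq_eq_SI]
  apply or_congr Iff.rfl
  constructor
  · rintro ⟨l, hl, hinf⟩
    refine ⟨l, hl, ?_⟩
    have := (List.reverse_infix (l₁ := palabra.toList) (l₂ := l.toList.reverse)).mpr hinf
    simpa using this
  · rintro ⟨l, hl, hinf⟩
    refine ⟨l, hl, ?_⟩
    have := (List.reverse_infix (l₁ := palabra.toList.reverse) (l₂ := l.toList)).mpr hinf
    simpa using this

-- ===== VERDICT (by name: the statement is the Claim_ definition above) =====
theorem proceso_spec : Claim_equal_proceso := by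
  intro tablero palabras _
  unfold Spec_proceso proceso proceso_alt
  have : (fun (solucion : List (List String)) (palabra : String) =>
      if izq_der tablero palabra = "SI" ∨ der_izq tablero palabra = "SI" then
        solucion ++ [[palabra ++ "- Si"]]
      else
        solucion ++ [[palabra ++ "- No"]]) =
      fun solucion palabra => solucion ++
        [if izq_der tablero palabra = "SI" ∨ der_izq tablero palabra = "SI" then
          [palabra ++ "- Si"] else [palabra ++ "- No"]] := by
    funext solucion palabra
    by_cases h : izq_der tablero palabra = "SI" ∨ der_izq tablero palabra = "SI" <;> simp [h]
  rw [this, PySem.List.foldl_append_singleton_eq_map, List.nil_append]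
  apply List.map_congr_left
  intro palabra _
  by_cases h : izq_der tablero palabra = "SI" ∨ der_izq tablero palabra = "SI"
  · rw [if_pos h, if_pos ((cond_equiv tablero palabra).mp h)]
  · rw [if_neg h, if_neg (fun hc => h ((cond_equiv tablero palabra).mpr hc))]
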